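-- pv_equiv track=rewrite | github.com/pypi-data/pypi-mirror-374 | packages/visualizr/visualizr-0.0.4.tar.gz/visualizr-0.0.4/src/visualizr/anitalker/dataset.py | get_multiple_ranges
-- ===== SOURCE A (Python) =====
-- def get_multiple_ranges(lists, multi_ranges):
--     """
--     Extract elements from a list based on multiple start-end index ranges.
--
--     Args:
--         lists (list): The list from which to extract elements.
--         multi_ranges (list of tuple): List of (start, end) index tuples.
--
--     Returns:
--         list: Flattened list of extracted elements from the specified ranges.
--
--     Raises:
--         ValueError: If `multi_ranges` is not a list of (start, end) tuples.
--
--     """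
--     # Ensure that `multi_ranges` is a list of tuples
--     if not all(isinstance(item, tuple) and len(item) == 2 for item in multi_ranges):
--         msg: str = (
--             "multi_ranges must be a list of (start, end) "
--             "tuples with exactly two elements each"
--         )
--         raise ValueError(msg)
--     extracted_elements = [lists[start:end] for start, end in multi_ranges]
--     return [item for sublist in extracted_elements for item in sublist]
-- ===== SOURCE B (Python) =====
-- def get_multiple_ranges(lists, multi_ranges):
--     if not all(isinstance(item, tuple) and len(item) == 2 for item in multi_ranges):
--         msg: str = (
--             "multi_ranges must be a list of (start, end) "
--             "tuples with exactly two elements each"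
--         )
--         raise ValueError(msg)
--     n = len(lists)
--     result = []
--     for start, end in multi_ranges:
--         s, e, _ = slice(start, end).indices(n)
--         for i in range(s, e):
--             result.append(lists[i])
--     return result
-- ===== Notes on version B (the rewrite author's own statement) =====
-- stated objective: alternative
-- what changed: B never slices: it normalizes each (start,end) pair to concrete clamped indices via slice.indices(len(lists)) and gathers elements one at a time by direct indexing into a single accumulator, instead of A's intermediate list of slice copies flattened by a nested comprehension.
import Mathlib
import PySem

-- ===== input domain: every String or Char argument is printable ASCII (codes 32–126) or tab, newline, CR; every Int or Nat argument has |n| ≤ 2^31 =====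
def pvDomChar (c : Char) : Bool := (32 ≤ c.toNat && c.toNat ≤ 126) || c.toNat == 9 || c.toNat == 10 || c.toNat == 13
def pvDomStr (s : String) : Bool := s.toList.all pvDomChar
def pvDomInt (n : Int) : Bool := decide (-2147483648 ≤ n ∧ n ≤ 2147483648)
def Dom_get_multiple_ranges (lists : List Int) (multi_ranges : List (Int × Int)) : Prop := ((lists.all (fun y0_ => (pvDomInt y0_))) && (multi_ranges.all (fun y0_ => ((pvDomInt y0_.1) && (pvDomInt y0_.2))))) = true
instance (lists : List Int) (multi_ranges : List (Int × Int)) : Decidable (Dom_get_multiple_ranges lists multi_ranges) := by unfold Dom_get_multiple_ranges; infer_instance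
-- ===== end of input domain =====

-- B replaces A's list-of-slice-copies + flattening comprehension by index normalization
-- (slice.indices) and element-by-element gathering into one accumulator (alternative, same cost).
-- The isinstance/len==2 validation always passes under the type List (Int × Int), so both are total.

-- ===== PORT A =====
def get_multiple_ranges (lists : List Int) (multi_ranges : List (Int × Int)) : List Int :=
  let extracted_elements := multi_ranges.map (fun se => PySem.List.slice lists (some se.1) (some se.2))
  extracted_elements.foldl (fun acc sublist => sublist.foldl (fun acc2 item => acc2 ++ [item]) acc) []

-- ===== PORT B =====
-- slice(start, end).indices(n) for step 1: shift a negative index by n, then clamp into [0, n]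
def pySliceIdx (n : Nat) (i : Int) : Nat :=
  if i < 0 then (if (n : Int) + i < 0 then 0 else ((n : Int) + i).toNat) else min i.toNat n

def get_multiple_ranges_alt (lists : List Int) (multi_ranges : List (Int × Int)) : List Int :=
  let n := lists.length
  multi_ranges.foldl (fun result se =>
    let s := pySliceIdx n se.1
    let e := pySliceIdx n se.2
    (PySem.List.pyRange (s : Int) (e : Int) 1).foldl
      (fun r i => r ++ [PySem.List.pyGetD lists i 0]) result) []

-- ===== PRECONDITION & SPEC =====
def Spec_get_multiple_ranges (lists : List Int) (multi_ranges : List (Int × Int)) (out : List Int) : Prop := out = get_multiple_ranges_alt lists multi_ranges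
instance (lists : List Int) (multi_ranges : List (Int × Int)) (out : List Int) : Decidable (Spec_get_multiple_ranges lists multi_ranges out) := by unfold Spec_get_multiple_ranges; infer_instance

-- ===== CLAIM (what is proved, stated in full; the proofs are below) =====
def Claim_equal_get_multiple_ranges : Prop := ∀ (lists : List Int) (multi_ranges : List (Int × Int)), Dom_get_multiple_ranges lists multi_ranges → Spec_get_multiple_ranges lists multi_ranges (get_multiple_ranges lists multi_ranges)

-- ===== LEMMAS AND PROOFS =====

theorem pySliceIdx_eq_clampIdx (n : Nat) (i : Int) :
    pySliceIdx n i = PySem.List.clampIdx n i := by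
  rfl

-- gathering xs[i] for i in range(s, e) is the clamped drop/take window, for e ≤ length
theorem map_pyGetD_range_eq_window (xs : List Int) (s e : Nat) (he : e ≤ xs.length) :
    (PySem.List.pyRange (s : Int) (e : Int) 1).map (fun i => PySem.List.pyGetD xs i 0)
      = (xs.drop s).take (e - s) := by
  by_cases hse : s ≤ e
  · have hsplit := PySem.List.pyRange_one_append (s : Int) (e : Int) (xs.length : Int)
      (by exact_mod_cast hse) (by exact_mod_cast he)
    have hdrop := PySem.List.map_pyGetD_pyRange' xs 0 (a := (s : Int)) (by positivity)
    rw [hsplit, List.map_append] at hdrop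
    have hlen : ((PySem.List.pyRange (s : Int) (e : Int) 1).map
        (fun i => PySem.List.pyGetD xs i 0)).length = e - s := by
      simp [PySem.List.length_pyRange_one]
    have := congrArg (List.take (e - s)) hdrop
    rw [List.take_append_of_le_length (by omega), ← hlen, List.take_length] at this
    simpa [Int.toNat_natCast] using this
  · rw [PySem.List.pyRange_one_eq_nil (by exact_mod_cast Nat.le_of_not_le hse)]
    simp [Nat.sub_eq_zero_of_le (Nat.le_of_not_le hse)]

theorem step_eq (lists : List Int) (se : Int × Int) (result : List Int) :
    (PySem.List.pyRange ((pySliceIdx lists.length se.1 : Nat) : Int)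
        ((pySliceIdx lists.length se.2 : Nat) : Int) 1).foldl
      (fun r i => r ++ [PySem.List.pyGetD lists i 0]) result
      = result ++ PySem.List.slice lists (some se.1) (some se.2) := by
  rw [PySem.List.foldl_append_singleton_eq_map, map_pyGetD_range_eq_window _ _ _
      (by rw [pySliceIdx_eq_clampIdx]; exact PySem.List.clampIdx_le _ _)]
  simp [pySliceIdx_eq_clampIdx, PySem.List.slice]

-- ===== VERDICT (by name: the statement is the Claim_ definition above) =====
theorem get_multiple_ranges_spec : Claim_equal_get_multiple_ranges := by
  intro lists multi_ranges _
  unfold Spec_get_multiple_ranges get_multiple_ranges get_multiple_ranges_alt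
  simp only [List.foldl_map, PySem.List.foldl_append_singleton, step_eq]
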